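-- pv_equiv track=rewrite | github.com/huamingao/homework | day5/第二模块通关面试.py | mysorted
-- ===== SOURCE A (Python) =====
-- def mysorted(list_a):
--     tmp_dict = {}
--     for l in list_a:
--         tmp_dict[l.upper()] = l
--     tmp_list = tmp_dict.keys()
--     tmp_list = sorted(tmp_list)
--     res_list = []
--     for l in tmp_list:
--         res_list.append(tmp_dict[l])
--     return res_list
-- ===== SOURCE B (Python) =====
-- def mysorted(list_a):
--     seen = set()
--     kept = []
--     for x in reversed(list_a):
--         u = x.upper()
--         if u not in seen:
--             seen.add(u)
--             kept.append(x)
--     return sorted(kept, key=lambda x: x.upper())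
-- ===== Notes on version B (the rewrite author's own statement) =====
-- stated objective: alternative
-- what changed: Replaces the upper-keyed dict (build, sort its keys, re-look each key up) by a reverse scan that keeps the last occurrence per uppercase key using a seen-set, followed by one stable sort of the kept elements with key=x.upper(); no dict and no second lookup pass.
import Mathlib
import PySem

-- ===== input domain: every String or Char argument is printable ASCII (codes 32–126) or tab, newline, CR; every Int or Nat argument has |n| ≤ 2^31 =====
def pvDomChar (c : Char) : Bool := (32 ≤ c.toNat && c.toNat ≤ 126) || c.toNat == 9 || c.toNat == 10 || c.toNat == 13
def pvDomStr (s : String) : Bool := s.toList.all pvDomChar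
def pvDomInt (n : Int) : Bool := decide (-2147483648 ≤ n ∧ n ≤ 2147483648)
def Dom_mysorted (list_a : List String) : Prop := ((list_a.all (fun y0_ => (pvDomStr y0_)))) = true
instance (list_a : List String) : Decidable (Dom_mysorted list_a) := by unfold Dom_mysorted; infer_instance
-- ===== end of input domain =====

-- B replaces A's upper-keyed dict + key sort + lookup pass by a reverse scan with a seen-set
-- (keeping the last occurrence per uppercase key) followed by one key-sort of the kept elements.

-- ===== PORT A =====
-- 'tmp_dict[l]' in the output loop always hits (l ranges over the dict's own keys), so it is
-- ported as getD with an unused default "" — exact on every admitted input.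
def mysorted (list_a : List String) : List String :=
  let tmp_dict := list_a.foldl (fun d l => d.insert (PySem.Str.upper l) l)
    (PySem.Dict.empty : PySem.Dict String String)
  let tmp_list := PySem.List.sorted tmp_dict.keys (fun x => x) false
  tmp_list.foldl (fun res l => res ++ [tmp_dict.getD l ""]) []

-- ===== PORT B =====
def mysorted_alt (list_a : List String) : List String :=
  let st := list_a.reverse.foldl
    (fun (st : PySem.Set String × List String) x =>
      let u := PySem.Str.upper x
      if PySem.Set.contains st.1 u then st else (PySem.Set.add st.1 u, st.2 ++ [x]))
    ((PySem.Set.empty : PySem.Set String), ([] : List String))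
  PySem.List.sorted st.2 (fun x => PySem.Str.upper x) false

-- ===== PRECONDITION & SPEC =====
def Spec_mysorted (list_a : List String) (out : List String) : Prop := out = mysorted_alt list_a
instance (list_a : List String) (out : List String) : Decidable (Spec_mysorted list_a out) := by unfold Spec_mysorted; infer_instance

-- ===== CLAIM (what is proved, stated in full; the proofs are below) =====
def Claim_equal_mysorted : Prop := ∀ (list_a : List String), Dom_mysorted list_a → Spec_mysorted list_a (mysorted list_a)

-- ===== LEMMAS AND PROOFS =====

-- res_list loop of A is a map
theorem pvFoldlAppMap (f : String → String) : ∀ (ks acc : List String),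
    ks.foldl (fun res l => res ++ [f l]) acc = acc ++ ks.map f := by
  intro ks
  induction ks with
  | nil => simp
  | cons x ks ih => intro acc; simp [List.foldl_cons, ih]

-- lookup in A's dict = last matching element of the list (find? on the reverse)
theorem pvGetLoop : ∀ (l : List String) (d0 : PySem.Dict String String) (k : String),
    (l.foldl (fun d x => d.insert (PySem.Str.upper x) x) d0).get? k
      = ((l.reverse.find? (fun x => PySem.Str.upper x == k)).or (d0.get? k)) := by
  intro l
  induction l with
  | nil => intro d0 k; simp
  | cons x l ih =>
    intro d0 k
    simp only [List.foldl_cons, List.reverse_cons, List.find?_append, ih]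
    rw [Option.or_assoc]
    congr 1
    rw [PySem.Dict.get?_insert]
    by_cases h : k = PySem.Str.upper x
    · simp [h]
    · simp [h, Ne.symm h]

-- B's reverse scan, written as structural recursion (proof-side helper only)
def pvFk (seen : PySem.Set String) : List String → List String
  | [] => []
  | x :: r =>
    if PySem.Set.contains seen (PySem.Str.upper x) then pvFk seen r
    else x :: pvFk (PySem.Set.add seen (PySem.Str.upper x)) r

theorem pvLoopEqFk : ∀ (r : List String) (seen : PySem.Set String) (kept : List String),
    (r.foldl
      (fun (st : PySem.Set String × List String) x =>
        let u := PySem.Str.upper x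
        if PySem.Set.contains st.1 u then st else (PySem.Set.add st.1 u, st.2 ++ [x]))
      (seen, kept)).2 = kept ++ pvFk seen r := by
  intro r
  induction r with
  | nil => intro seen kept; simp [pvFk]
  | cons x r ih =>
    intro seen kept
    dsimp only [List.foldl_cons]
    by_cases h : PySem.Set.contains seen (PySem.Str.upper x) = true
    · rw [if_pos h, ih]
      simp only [pvFk, h, if_true]
    · rw [if_neg h, ih]
      simp only [pvFk, h, Bool.false_eq_true, if_false, List.append_assoc, List.singleton_append]

theorem pvFkMem : ∀ (r : List String) (seen : PySem.Set String) (k : String),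
    k ∈ (pvFk seen r).map PySem.Str.upper ↔
      k ∈ r.map PySem.Str.upper ∧ k ∉ seen := by
  intro r
  induction r with
  | nil => intro seen k; simp [pvFk]
  | cons x r ih =>
    intro seen k
    by_cases h : PySem.Set.contains seen (PySem.Str.upper x)
    · have hx : PySem.Str.upper x ∈ seen := (PySem.Set.contains_iff _ _).1 h
      simp only [pvFk, h, if_true, List.map_cons, List.mem_cons, ih]
      constructor
      · rintro ⟨hm, hs⟩; exact ⟨Or.inr hm, hs⟩
      · rintro ⟨hm | hm, hs⟩
        · exact absurd (hm ▸ hx) hs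
        · exact ⟨hm, hs⟩
    · have hx : PySem.Str.upper x ∉ seen := fun hmem => h ((PySem.Set.contains_iff _ _).2 hmem)
      simp only [pvFk, h, Bool.false_eq_true, if_false, List.map_cons, List.mem_cons, ih, PySem.Set.mem_add]
      constructor
      · rintro (hk | ⟨hm, hs⟩)
        · exact ⟨Or.inl hk, hk ▸ hx⟩
        · exact ⟨Or.inr hm, fun hmem => hs (Or.inl hmem)⟩
      · rintro ⟨hk | hm, hs⟩
        · exact Or.inl hk
        · by_cases hk2 : k = PySem.Str.upper x
          · exact Or.inl hk2
          · exact Or.inr ⟨hm, fun hmem => hmem.elim hs hk2⟩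

theorem pvFkNodup : ∀ (r : List String) (seen : PySem.Set String),
    ((pvFk seen r).map PySem.Str.upper).Nodup := by
  intro r
  induction r with
  | nil => intro seen; simp [pvFk]
  | cons x r ih =>
    intro seen
    by_cases h : PySem.Set.contains seen (PySem.Str.upper x)
    · have hx : PySem.Str.upper x ∈ seen := (PySem.Set.contains_iff _ _).1 h
      simpa [pvFk, hx] using ih seen
    · simp only [pvFk, h, Bool.false_eq_true, if_false, List.map_cons, List.nodup_cons]
      refine ⟨fun hmem => ?_, ih _⟩
      have := (pvFkMem r (PySem.Set.add seen (PySem.Str.upper x)) (PySem.Str.upper x)).1 hmem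
      exact this.2 ((PySem.Set.mem_add _ _ _).2 (Or.inr rfl))

theorem pvFkFind : ∀ (r : List String) (seen : PySem.Set String) (x' : String),
    x' ∈ pvFk seen r →
      r.find? (fun y => PySem.Str.upper y == PySem.Str.upper x') = some x' := by
  intro r
  induction r with
  | nil => intro seen x' h; simp [pvFk] at h
  | cons x r ih =>
    intro seen x' hmem
    by_cases h : PySem.Set.contains seen (PySem.Str.upper x)
    · have hx : PySem.Str.upper x ∈ seen := (PySem.Set.contains_iff _ _).1 h
      simp only [pvFk, h, if_true] at hmem
      have hne : PySem.Str.upper x' ≠ PySem.Str.upper x := by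
        intro he
        have := (pvFkMem r seen (PySem.Str.upper x')).1
          (List.mem_map.2 ⟨x', hmem, rfl⟩)
        exact this.2 (he ▸ hx)
      rw [List.find?_cons_of_neg (by simp [Ne.symm hne]), ih _ _ hmem]
    · simp only [pvFk, h, Bool.false_eq_true, if_false, List.mem_cons] at hmem
      rcases hmem with rfl | hmem
      · rw [List.find?_cons_of_pos (by simp)]
      · have hne : PySem.Str.upper x' ≠ PySem.Str.upper x := by
          intro he
          have := (pvFkMem r (PySem.Set.add seen (PySem.Str.upper x)) (PySem.Str.upper x')).1
            (List.mem_map.2 ⟨x', hmem, rfl⟩)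
          exact this.2 ((PySem.Set.mem_add _ _ _).2 (Or.inr he.symm.symm))
        rw [List.find?_cons_of_neg (by simp [Ne.symm hne]), ih _ _ hmem]

-- ===== VERDICT (by name: the statement is the Claim_ definition above) =====
theorem mysorted_spec : Claim_equal_mysorted := by
  intro list_a _
  unfold Spec_mysorted mysorted mysorted_alt
  dsimp only
  rw [pvLoopEqFk, pvFoldlAppMap]
  simp only [List.nil_append]
  -- abbreviations
  generalize hd : list_a.foldl (fun d l => d.insert (PySem.Str.upper l) l)
      (PySem.Dict.empty : PySem.Dict String String) = d
  have hkeys : d.keys = PySem.Set.ofList (list_a.map PySem.Str.upper) := by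
    rw [← hd, PySem.Dict.keys_foldl_insert_key]
    simp [PySem.Set.update_nil_left]
  -- kept's keys are a permutation of the dict's keys
  have hnd1 : ((pvFk PySem.Set.empty list_a.reverse).map PySem.Str.upper).Nodup :=
    pvFkNodup _ _
  have hnd2 : d.keys.Nodup := by rw [hkeys]; exact PySem.Set.nodup_ofList _
  have hperm_kmap :
      ((pvFk PySem.Set.empty list_a.reverse).map PySem.Str.upper).Perm d.keys := by
    rw [List.perm_ext_iff_of_nodup hnd1 hnd2]
    intro k
    rw [pvFkMem, hkeys, PySem.Set.mem_ofList]
    simp [PySem.Set.empty, List.mem_map]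
  -- looking the dict up at a kept element's key gives back that element
  have hget : ∀ x' ∈ pvFk PySem.Set.empty list_a.reverse,
      d.getD (PySem.Str.upper x') "" = x' := by
    intro x' hx
    have hfind := pvFkFind list_a.reverse PySem.Set.empty x' hx
    have hq : d.get? (PySem.Str.upper x') = some x' := by
      rw [← hd, pvGetLoop, hfind]
      simp
    rw [PySem.Dict.getD_eq_get?_getD, hq]
    rfl
  have hkeyval : ∀ k ∈ d.keys, PySem.Str.upper (d.getD k "") = k := by
    intro k hk
    have : k ∈ (pvFk PySem.Set.empty list_a.reverse).map PySem.Str.upper :=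
      hperm_kmap.mem_iff.2 hk
    rcases List.mem_map.1 this with ⟨x', hx', rfl⟩
    rw [hget x' hx']
  -- the two sides agree: A's output is a strictly key-increasing rearrangement of kept
  have hpw : ((PySem.List.sorted d.keys (fun x => x) false).map
      (fun l => d.getD l "")).Pairwise (fun a b => PySem.Str.upper a < PySem.Str.upper b) := by
    rw [List.pairwise_map]
    have hsp : (PySem.List.sorted d.keys (fun x => x) false).Pairwise (· < ·) := by
      rw [hkeys]; exact PySem.List.sorted_ofList_pairwise_lt _
    refine List.Pairwise.imp_of_mem ?_ hsp
    intro a b ha hb hlt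
    have ha' : a ∈ d.keys := (PySem.List.mem_sorted _ _ _ _).1 ha
    have hb' : b ∈ d.keys := (PySem.List.mem_sorted _ _ _ _).1 hb
    rw [hkeyval a ha', hkeyval b hb']
    exact hlt
  have hperm : ((PySem.List.sorted d.keys (fun x => x) false).map
      (fun l => d.getD l "")).Perm (pvFk PySem.Set.empty list_a.reverse) := by
    refine ((PySem.List.sorted_perm _ _ _).map _).trans ?_
    refine ((hperm_kmap.symm).map _).trans ?_
    rw [List.map_map]
    have hmapid : List.map ((fun l => d.getD l "") ∘ PySem.Str.upper)
        (pvFk PySem.Set.empty list_a.reverse) = pvFk PySem.Set.empty list_a.reverse := by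
      have h2 := List.map_congr_left (l := pvFk PySem.Set.empty list_a.reverse)
        (f := (fun l => d.getD l "") ∘ PySem.Str.upper) (g := fun x => x)
        (fun x hx => hget x hx)
      simpa using h2
    rw [hmapid]
  exact (PySem.List.sorted_eq_of_perm_of_pairwise_lt _ _ _ hperm hpw).symm
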